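-- pv_equiv track=rewrite | github.com/venkatsurepa/Video-Generation | backend/src/services/video_assembler.py | _assign_ken_burns_types
-- ===== SOURCE A (Python) =====
-- KEN_BURNS_TYPES = [
--     "zoom_in",
--     "pan_right",
--     "zoom_out",
--     "pan_left",
--     "pan_up",
--     "pan_down",
-- ]
--
-- def _assign_ken_burns_types(scene_count: int) -> list[str]:
--     """Assign Ken Burns movement types to scenes.
--
--     Cycles through: zoom_in, pan_right, zoom_out, pan_left, pan_up, pan_down
--     Deterministic rotation based on scene index — never repeats consecutively.
--     """
--     types: list[str] = []
--     for i in range(scene_count):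
--         kb_type = KEN_BURNS_TYPES[i % len(KEN_BURNS_TYPES)]
--
--         # Guard against consecutive repeat (shouldn't happen with 6-cycle,
--         # but protects against edge cases with very few scenes)
--         if types and kb_type == types[-1]:
--             kb_type = KEN_BURNS_TYPES[(i + 1) % len(KEN_BURNS_TYPES)]
--
--         types.append(kb_type)
--
--     return types
-- ===== SOURCE B (Python) =====
-- KEN_BURNS_TYPES = [
--     "zoom_in",
--     "pan_right",
--     "zoom_out",
--     "pan_left",
--     "pan_up",
--     "pan_down",
-- ]
--
-- def _assign_ken_burns_types(scene_count: int) -> list[str]: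
--     """Repeat the 6-type cycle enough times and truncate to scene_count."""
--     if scene_count <= 0:
--         return []
--     return (KEN_BURNS_TYPES * (scene_count // 6 + 1))[:scene_count]
-- ===== Notes on version B (the rewrite author's own statement) =====
-- stated objective: simpler
-- what changed: Replaces the per-index modulo loop with its dead consecutive-repeat guard by tiling the base cycle enough times and truncating with a slice.
import Mathlib
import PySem

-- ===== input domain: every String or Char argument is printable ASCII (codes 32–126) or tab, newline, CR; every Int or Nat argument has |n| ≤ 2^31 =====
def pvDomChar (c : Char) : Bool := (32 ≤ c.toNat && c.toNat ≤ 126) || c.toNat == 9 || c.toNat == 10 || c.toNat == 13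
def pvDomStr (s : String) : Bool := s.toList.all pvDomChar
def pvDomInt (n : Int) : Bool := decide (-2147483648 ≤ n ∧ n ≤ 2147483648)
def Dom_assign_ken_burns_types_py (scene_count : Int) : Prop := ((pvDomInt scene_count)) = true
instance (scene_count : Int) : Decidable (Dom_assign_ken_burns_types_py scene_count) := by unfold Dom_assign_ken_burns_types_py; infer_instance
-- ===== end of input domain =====

-- B replaces A's modulo loop (with its dead consecutive-repeat guard) by repetition-then-truncation; objective: simpler.

-- ===== PORT A =====
def kenBurnsTypes : List String :=
  ["zoom_in", "pan_right", "zoom_out", "pan_left", "pan_up", "pan_down"]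

-- literal transliteration of A's loop: for i in range(scene_count), index by i % 6,
-- guard against repeating the previous element, append.
def assign_ken_burns_types_py (scene_count : Int) : List String :=
  (PySem.List.pyRange 0 scene_count 1).foldl (fun types i =>
    let kb_type := PySem.List.pyGetD kenBurnsTypes (PySem.Int.mod i (kenBurnsTypes.length : Int)) ""
    let kb_type :=
      if types ≠ [] ∧ PySem.List.pyGet? types (-1) = some kb_type then
        PySem.List.pyGetD kenBurnsTypes (PySem.Int.mod (i + 1) (kenBurnsTypes.length : Int)) ""
      else kb_type
    types ++ [kb_type]) []

-- ===== PORT B =====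
-- transliteration of B: empty for non-positive counts, else tile the base list
-- scene_count // 6 + 1 times and slice to scene_count.
def assign_ken_burns_types_py_alt (scene_count : Int) : List String :=
  if scene_count ≤ 0 then []
  else
    PySem.List.slice
      ((List.replicate (PySem.Int.floordiv scene_count 6 + 1).toNat kenBurnsTypes).flatten)
      none (some scene_count)

-- ===== PRECONDITION & SPEC =====
def Spec_assign_ken_burns_types_py (scene_count : Int) (out : List String) : Prop := out = assign_ken_burns_types_py_alt scene_count
instance (scene_count : Int) (out : List String) : Decidable (Spec_assign_ken_burns_types_py scene_count out) := by unfold Spec_assign_ken_burns_types_py; infer_instance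

-- ===== CLAIM (what is proved, stated in full; the proofs are below) =====
def Claim_equal_assign_ken_burns_types_py : Prop := ∀ (scene_count : Int), Dom_assign_ken_burns_types_py scene_count → Spec_assign_ken_burns_types_py scene_count (assign_ken_burns_types_py scene_count)

-- ===== LEMMAS AND PROOFS =====

-- canonical value: the i-th assigned type
def kbG (i : Nat) : String := kenBurnsTypes.getD (i % 6) ""

theorem kbG_ne_succ (n : Nat) : kbG n ≠ kbG (n + 1) := by
  unfold kbG
  have h : n % 6 < 6 := Nat.mod_lt _ (by omega)
  have h' : (n + 1) % 6 = (n % 6 + 1) % 6 := by omega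
  rw [h']
  interval_cases hn : n % 6 <;> decide

theorem kbG_add_six (i : Nat) : kbG (i + 6) = kbG i := by
  unfold kbG; congr 1; omega

-- A's fold over range n produces the canonical map
theorem foldA_eq_map (n : Nat) :
    assign_ken_burns_types_py (n : Int) = (List.range n).map kbG := by
  induction n with
  | zero => simp [assign_ken_burns_types_py, PySem.List.pyRange_one_eq_nil]
  | succ n ih =>
    have hsplit : PySem.List.pyRange 0 ((n : Int) + 1) 1
        = PySem.List.pyRange 0 (n : Int) 1 ++ [(n : Int)] :=
      PySem.List.pyRange_one_succ_right (by positivity)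
    unfold assign_ken_burns_types_py at ih ⊢
    push_cast
    rw [hsplit, List.foldl_append, ih]
    simp only [List.foldl_cons, List.foldl_nil, List.range_succ, List.map_append, List.map_cons,
      List.map_nil]
    have hget : PySem.List.pyGetD kenBurnsTypes
        (PySem.Int.mod (n : Int) (kenBurnsTypes.length : Int)) "" = kbG n := by
      have hm : PySem.Int.mod (n : Int) (kenBurnsTypes.length : Int) = ((n % 6 : Nat) : Int) :=
        PySem.Int.mod_natCast n 6
      rw [hm, PySem.List.pyGetD_natCast]; rfl
    rcases Nat.eq_zero_or_pos n with hn | hn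
    · subst hn; simpa using hget
    · have hne : (List.range n).map kbG ≠ [] := by
        simp [List.map_eq_nil_iff, List.range_eq_nil]; omega
      have hlast : PySem.List.pyGet? ((List.range n).map kbG) (-1)
          = some (kbG (n - 1)) := by
        rw [PySem.List.pyGet?_neg_one, List.getLast?_eq_getElem?]
        simp [Nat.sub_lt hn]
      have hdiff : kbG (n - 1) ≠ kbG n := by
        have := kbG_ne_succ (n - 1)
        rwa [Nat.sub_add_cancel hn] at this
      simp only [hget, hlast, hne, ne_eq, not_false_iff, true_and, Option.some.injEq]
      rw [if_neg hdiff]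

-- unrolling one period of the canonical map
theorem map_kbG_range (n : Nat) (h : 6 ≤ n) :
    (List.range n).map kbG = kenBurnsTypes ++ (List.range (n - 6)).map kbG := by
  conv_lhs => rw [show n = 6 + (n - 6) by omega]
  rw [List.range_add, List.map_append, List.map_map,
    show (List.range 6).map kbG = kenBurnsTypes from by decide]
  congr 1
  exact List.map_congr_left (fun a _ => by simp [Function.comp, Nat.add_comm 6 a, kbG_add_six])

-- B's tile-and-truncate produces the canonical map whenever 6*k covers n
theorem flatten_replicate_take (k n : Nat) (h : n ≤ 6 * k) :
    ((List.replicate k kenBurnsTypes).flatten).take n = (List.range n).map kbG := by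
  induction k generalizing n with
  | zero =>
    have : n = 0 := by omega
    subst this; simp
  | succ k ih =>
    rw [List.replicate_succ, List.flatten_cons]
    by_cases hn : n ≤ 6
    · rw [List.take_append_of_le_length (by simp [kenBurnsTypes]; omega)]
      interval_cases n <;> decide
    · rw [List.take_append, List.take_of_length_le (by simp [kenBurnsTypes]; omega),
        show kenBurnsTypes.length = 6 from rfl, ih (n - 6) (by omega),
        map_kbG_range n (by omega)]

theorem altB_eq_map (n : Nat) :
    assign_ken_burns_types_py_alt (n : Int) = (List.range n).map kbG := by
  unfold assign_ken_burns_types_py_alt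
  rcases Nat.eq_zero_or_pos n with hn | hn
  · subst hn; simp
  · rw [if_neg (by exact_mod_cast Nat.not_lt.mpr hn ∘ fun h => by omega)]
    rw [PySem.List.slice_to_natCast]
    have hfd : PySem.Int.floordiv (n : Int) 6 = ((n / 6 : Nat) : Int) := by
      exact_mod_cast PySem.Int.floordiv_natCast n 6
    rw [hfd]
    have : ((((n / 6 : Nat) : Int)) + 1).toNat = n / 6 + 1 := by omega
    rw [this]
    exact flatten_replicate_take _ _ (by omega)

-- ===== VERDICT (by name: the statement is the Claim_ definition above) =====
theorem assign_ken_burns_types_py_spec : Claim_equal_assign_ken_burns_types_py := by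
  intro n _
  unfold Spec_assign_ken_burns_types_py
  by_cases h : n ≤ 0
  · -- both sides see an empty/negative range
    have hA : assign_ken_burns_types_py n = [] := by
      unfold assign_ken_burns_types_py
      rw [PySem.List.pyRange_one_eq_nil h]; rfl
    have hB : assign_ken_burns_types_py_alt n = [] := by
      unfold assign_ken_burns_types_py_alt; rw [if_pos h]
    rw [hA, hB]
  · obtain ⟨m, rfl⟩ := Int.eq_ofNat_of_zero_le (le_of_lt (by omega : (0:Int) < n))
    rw [foldA_eq_map, altB_eq_map]
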